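-- pv_equiv track=rewrite | github.com/HoroshiyChelovec/WS-2023 | RegisterMachineInterpreter.py | parse
-- ===== SOURCE A (Python) =====
-- def parse(raw_code):
--     code = []
--     operators = ['(', ')', '!', '@', '#', '=', '/', '%', '&', '^', '?']
--     data = ''
--     j = -1
--     is_data = False
--     for i in raw_code:
--         if not is_data:
--             if i in operators:
--                 j += 1
--                 code.append(i + ' ')
--             elif i == ',':
--                 code[j] += ' '
--             else:
--                 code[j] += i
--             if i == '%':
--                 is_data = True
--         else:
--             data += i
--     return code, data
-- ===== SOURCE B (Python) =====
-- def _next_op(s, ops):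
--     # index of the first operator at position >= 1, or len(s) if none
--     for k in range(1, len(s)):
--         if s[k] in ops:
--             return k
--     return len(s)
--
--
-- def tokenize(s):
--     ops = '()!@#=/%&^?'
--     if s == '':
--         return []
--     nxt = _next_op(s, ops)
--     head = s[0] + ' ' + ''.join(' ' if ch == ',' else ch for ch in s[1:nxt])
--     return [head] + tokenize(s[nxt:])
--
--
-- def parse(raw_code):
--     idx = raw_code.find('%')
--     code_part = raw_code if idx == -1 else raw_code[:idx + 1]
--     data = '' if idx == -1 else raw_code[idx + 1:]
--     return tokenize(code_part), data
-- ===== Notes on version B (the rewrite author's own statement) =====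
-- stated objective: simpler
-- what changed: A's single stateful pass with an is_data flag and a running index j is replaced by a partition-then-tokenize decomposition: split the source at the first '%' (find + two slices), then recursively cut the code part into operator-led segments and build each token in one step from its segment.
import Mathlib
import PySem

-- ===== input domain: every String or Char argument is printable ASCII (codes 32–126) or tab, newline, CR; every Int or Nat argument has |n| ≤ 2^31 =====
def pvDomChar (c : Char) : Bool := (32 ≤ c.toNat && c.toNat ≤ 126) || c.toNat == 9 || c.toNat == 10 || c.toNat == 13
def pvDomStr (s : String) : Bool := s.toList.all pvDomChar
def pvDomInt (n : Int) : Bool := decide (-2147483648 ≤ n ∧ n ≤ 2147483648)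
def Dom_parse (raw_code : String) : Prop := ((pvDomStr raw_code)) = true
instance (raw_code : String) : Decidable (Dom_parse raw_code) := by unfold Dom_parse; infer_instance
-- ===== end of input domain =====

-- B replaces A's single stateful pass (is_data flag + running index j) by a
-- partition-at-'%' then recursive segment-by-segment tokenizer (objective: simpler).

-- the operator list; A's Python has it as a list literal, B's as the string
-- '()!@#=/%&^?' with the same characters in the same order, so both ports share it
def operators : List Char := ['(', ')', '!', '@', '#', '=', '/', '%', '&', '^', '?']

-- ===== PORT A =====
-- loop state: (code, data, j, is_data); strings are built as List Char and turned
-- into String at the very end (Lean's own String.append is kernel-opaque)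
def stepA : (List (List Char) × List Char × Int × Bool) → Char → (List (List Char) × List Char × Int × Bool)
  | (code, data, j, isd), c =>
    if !isd then
      let cj : List (List Char) × Int :=
        if c ∈ operators then (code ++ [[c, ' ']], j + 1)
        else if c = ',' then (PySem.List.pySetD code j (PySem.List.pyGetD code j [] ++ [' ']), j)
        else (PySem.List.pySetD code j (PySem.List.pyGetD code j [] ++ [c]), j)
      (cj.1, data, cj.2, if c = '%' then true else isd)
    else (code, data ++ [c], j, isd)

def parse (raw_code : String) : List String × String :=
  let st := raw_code.toList.foldl stepA ([], [], -1, false)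
  (st.1.map String.ofList, String.ofList st.2.1)

-- ===== PORT B =====
-- _next_op(s, ops): first k in range(1, len(s)) with s[k] an operator, else len(s);
-- ported as 1 + findIdx over s[1:] (findIdx returns the length when nothing matches)
def nextOp (s : List Char) : Nat := 1 + List.findIdx (fun ch => decide (ch ∈ operators)) (s.drop 1)

-- tokenize(s); s[1:nxt] = rest.take (nxt-1), s[nxt:] = rest.drop (nxt-1) (exact: 1 ≤ nxt);
-- ''.join(' ' if ch == ',' else ch for ch in …) is the map
def tokenizeL : List Char → List (List Char)
  | [] => []
  | c :: rest =>
    ([c, ' '] ++ (rest.take (nextOp (c :: rest) - 1)).map (fun ch => if ch = ',' then ' ' else ch))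
      :: tokenizeL (rest.drop (nextOp (c :: rest) - 1))
termination_by s => s.length
decreasing_by simp

def parse_alt (raw_code : String) : List String × String :=
  let cs := raw_code.toList
  let idx := PySem.Chars.find cs ['%']          -- raw_code.find('%')
  let code_part := if idx = -1 then cs else cs.take (idx.toNat + 1)   -- raw_code[:idx+1], 0 ≤ idx
  let data := if idx = -1 then ([] : List Char) else cs.drop (idx.toNat + 1)  -- raw_code[idx+1:]
  ((tokenizeL code_part).map String.ofList, String.ofList data)

-- ===== PRECONDITION & SPEC =====
-- A raises IndexError (code[j] on the empty list) exactly when the source is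
-- nonempty and its first character is not an operator; Pre_ excludes those inputs.
def Pre_parse (raw_code : String) : Prop := ((raw_code.toList.take 1).all (fun c => decide (c ∈ operators))) = true
instance (raw_code : String) : Decidable (Pre_parse raw_code) := by unfold Pre_parse; infer_instance

def pvWitness_parse : String := "(ab,cd)!x%123"

def Spec_parse (raw_code : String) (out : List String × String) : Prop := out = parse_alt raw_code
instance (raw_code : String) (out : List String × String) : Decidable (Spec_parse raw_code out) := by unfold Spec_parse; infer_instance

-- ===== CLAIM (what is proved, stated in full; the proofs are below) =====
def Claim_equal_parse : Prop := ∀ (raw_code : String), Dom_parse raw_code → Pre_parse raw_code → Spec_parse raw_code (parse raw_code)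

-- ===== LEMMAS AND PROOFS =====

-- equation lemmas for the well-founded tokenizeL
lemma tokenizeL_nil : tokenizeL [] = [] := by unfold tokenizeL; rfl

lemma tokenizeL_cons (c : Char) (rest : List Char) : tokenizeL (c :: rest) =
    ([c, ' '] ++ (rest.take (nextOp (c :: rest) - 1)).map (fun ch => if ch = ',' then ' ' else ch))
      :: tokenizeL (rest.drop (nextOp (c :: rest) - 1)) := by
  conv_lhs => unfold tokenizeL

lemma nextOp_cons (c : Char) (rest : List Char) :
    nextOp (c :: rest) - 1 = List.findIdx (fun ch => decide (ch ∈ operators)) rest := by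
  simp [nextOp]

-- proof-side description of what A's loop does on the code side
def fchar (c : Char) : Char := if c = ',' then ' ' else c

def tokAcc (acc : List Char) : List Char → List (List Char)
  | [] => [acc]
  | c :: rest =>
    if c = '%' then [acc, ['%', ' ']]
    else if c ∈ operators then acc :: tokAcc [c, ' '] rest
    else tokAcc (acc ++ [fchar c]) rest

def datAcc : List Char → List Char
  | [] => []
  | c :: rest => if c = '%' then rest else datAcc rest

-- how a single A-step evaluates, by branch
lemma stepA_dat (code : List (List Char)) (data : List Char) (j : Int) (c : Char) :
    stepA (code, data, j, true) c = (code, data ++ [c], j, true) := by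
  simp [stepA]

lemma stepA_op {c : Char} (code : List (List Char)) (data : List Char) (j : Int)
    (h : c ∈ operators) :
    stepA (code, data, j, false) c = (code ++ [[c, ' ']], data, j + 1, decide (c = '%')) := by
  simp only [stepA, Bool.not_false, if_true]
  rw [if_pos h]
  by_cases h' : c = '%' <;> simp [h']

lemma stepA_plain {c : Char} (code : List (List Char)) (data : List Char) (j : Int)
    (h : c ∉ operators) :
    stepA (code, data, j, false) c
      = (PySem.List.pySetD code j (PySem.List.pyGetD code j [] ++ [fchar c]), data, j, false) := by
  have hp : c ≠ '%' := fun hx => h (hx ▸ (by decide))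
  simp only [stepA, Bool.not_false, if_true]
  rw [if_neg h]
  by_cases hcm : c = ',' <;> simp [hcm, fchar, hp]

lemma foldA_data (cs : List Char) : ∀ (code : List (List Char)) (data : List Char) (j : Int),
    cs.foldl stepA (code, data, j, true) = (code, data ++ cs, j, true) := by
  induction cs with
  | nil => intro code data j; simp
  | cons c rest ih => intro code data j; rw [List.foldl_cons, stepA_dat, ih]; simp

lemma pyGetD_append_len (done : List (List Char)) (acc : List Char) :
    PySem.List.pyGetD (done ++ [acc]) (done.length : Int) [] = acc := by
  simp [PySem.List.pyGetD_natCast, List.getD]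

lemma pySetD_append_len (done : List (List Char)) (acc v : List Char) :
    PySem.List.pySetD (done ++ [acc]) (done.length : Int) v = done ++ [v] := by
  simp [PySem.List.pySetD_natCast]

lemma foldA_code (cs : List Char) : ∀ (done : List (List Char)) (acc data : List Char),
    cs.foldl stepA (done ++ [acc], data, (done.length : Int), false)
      = (done ++ tokAcc acc cs, data ++ datAcc cs,
         ((done ++ tokAcc acc cs).length : Int) - 1, decide ('%' ∈ cs)) := by
  induction cs with
  | nil => intro done acc data; simp [tokAcc, datAcc]
  | cons c rest ih =>
    intro done acc data
    by_cases hpc : c = '%'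
    · subst hpc
      rw [List.foldl_cons, stepA_op _ _ _ (by decide),
          show (decide (('%' : Char) = '%')) = true from by decide, foldA_data]
      simp only [tokAcc, datAcc]
      simp [Prod.ext_iff]
      omega
    · have hmemeq : ('%' ∈ c :: rest) = ('%' ∈ rest) := by
        simp only [List.mem_cons, eq_iff_iff]
        exact ⟨fun h => h.resolve_left fun hx => hpc hx.symm, Or.inr⟩
      by_cases hop : c ∈ operators
      · rw [List.foldl_cons, stepA_op _ _ _ hop,
            show (decide (c = '%')) = false by simp [hpc],
            show (done ++ [acc] ++ [[c, ' ']] : List (List Char)) = (done ++ [acc]) ++ [[c, ' ']] by simp,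
            show ((done.length : Int) + 1) = (((done ++ [acc]).length : Int)) by simp,
            ih]
        simp only [tokAcc, datAcc, hpc, ite_false, hop, if_pos, hmemeq]
        simp
      · rw [List.foldl_cons, stepA_plain _ _ _ hop, pyGetD_append_len, pySetD_append_len, ih]
        simp only [tokAcc, datAcc, hpc, ite_false, hop, hmemeq]

-- tokAcc agrees with B's segment tokenizer as long as '%' can only be the last character
lemma tokAcc_eq_tokenizeL (cs : List Char) : ∀ acc : List Char, '%' ∉ cs.dropLast →
    tokAcc acc cs
      = (acc ++ (cs.take (List.findIdx (fun ch => decide (ch ∈ operators)) cs)).map fchar)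
        :: tokenizeL (cs.drop (List.findIdx (fun ch => decide (ch ∈ operators)) cs)) := by
  induction cs with
  | nil => intro acc h; simp [tokAcc, tokenizeL_nil]
  | cons c rest ih =>
    intro acc h
    by_cases hpc : c = '%'
    · subst hpc
      have hrest : rest = [] := by
        cases rest with
        | nil => rfl
        | cons r rs => exact absurd (by simp [List.dropLast_cons₂]) h
      subst hrest
      have hd : (fun ch => decide (ch ∈ operators)) '%' = true := by decide
      simp only [tokAcc, List.findIdx_cons, hd, cond_true, List.take_zero,
        List.map_nil, List.append_nil, List.drop_zero]
      rw [tokenizeL_cons]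
      simp [nextOp, tokenizeL_nil]
    · have h' : '%' ∉ rest.dropLast := by
        intro hx
        apply h
        cases rest with
        | nil => simp at hx
        | cons r rs => rw [List.dropLast_cons₂]; exact List.mem_cons_of_mem _ hx
      by_cases hop : c ∈ operators
      · simp only [tokAcc, hpc, ite_false, hop, if_pos, List.findIdx_cons, decide_true,
          cond_true, List.take_zero, List.drop_zero, List.map_nil, List.append_nil]
        rw [ih [c, ' '] h', tokenizeL_cons, nextOp_cons]
        rfl
      · simp only [tokAcc, hpc, ite_false, hop, List.findIdx_cons, decide_false,
          cond_false]
        rw [ih (acc ++ [fchar c]) h']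
        simp [List.take_succ_cons, List.drop_succ_cons]

-- tokAcc / datAcc stop at the first '%'
lemma tokAcc_stop (pre : List Char) : ∀ (post acc : List Char), '%' ∉ pre →
    tokAcc acc (pre ++ '%' :: post) = tokAcc acc (pre ++ ['%']) := by
  induction pre with
  | nil => intro post acc _; simp [tokAcc]
  | cons p ps ih =>
    intro post acc h
    have hp : p ≠ '%' := fun hx => h (by simp [hx])
    have h' : '%' ∉ ps := fun hx => h (by simp [hx])
    by_cases hop : p ∈ operators
    · simp only [List.cons_append, tokAcc, hp, ite_false, hop, if_pos]
      rw [ih post [p, ' '] h']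
    · simp only [List.cons_append, tokAcc, hp, ite_false, hop]
      rw [ih post (acc ++ [fchar p]) h']

lemma datAcc_app (pre : List Char) : ∀ post : List Char, '%' ∉ pre →
    datAcc (pre ++ '%' :: post) = post := by
  induction pre with
  | nil => intro post _; simp [datAcc]
  | cons p ps ih =>
    intro post h
    have hp : p ≠ '%' := fun hx => h (by simp [hx])
    simp only [List.cons_append, datAcc, hp, ite_false]
    exact ih post (fun hx => h (by simp [hx]))

lemma datAcc_none (cs : List Char) (h : '%' ∉ cs) : datAcc cs = [] := by
  induction cs with
  | nil => rfl
  | cons c rest ih =>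
    have hp : c ≠ '%' := fun hx => h (by simp [hx])
    simp only [datAcc, hp, ite_false]
    exact ih (fun hx => h (by simp [hx]))

lemma first_pct_split {cs : List Char} (h : '%' ∈ cs) :
    ∃ pre post, cs = pre ++ '%' :: post ∧ '%' ∉ pre := by
  induction cs with
  | nil => simp at h
  | cons c rest ih =>
    by_cases hpc : c = '%'
    · exact ⟨[], rest, by simp [hpc], by simp⟩
    · obtain ⟨pre, post, heq, hnp⟩ :=
        ih ((List.mem_cons.mp h).resolve_left fun hx => hpc hx.symm)
      refine ⟨c :: pre, post, by simp [heq], ?_⟩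
      intro hx
      rcases List.mem_cons.mp hx with h1 | h1
      · exact hpc h1.symm
      · exact hnp h1

lemma find_pct_none (cs : List Char) (h : '%' ∉ cs) : PySem.Chars.find cs ['%'] = -1 := by
  rw [PySem.Chars.find_eq_neg_one_iff _ _]
  intro hinf
  exact h (hinf.subset (by simp))

lemma find_pct_at (pre post : List Char) (h : '%' ∉ pre) :
    PySem.Chars.find (pre ++ '%' :: post) ['%'] = (pre.length : Int) := by
  have hinf : ['%'] <:+: (pre ++ '%' :: post) := ⟨pre, post, by simp⟩
  have hnn : 0 ≤ PySem.Chars.find (pre ++ '%' :: post) ['%'] :=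
    (PySem.Chars.find_nonneg_iff _ _).mpr hinf
  obtain ⟨hpref, hmin⟩ := PySem.Chars.find_spec hnn
  set n := PySem.Chars.find (pre ++ '%' :: post) ['%'] with hn
  have hle : n.toNat ≤ pre.length := by
    by_contra hgt
    exact hmin pre.length (by omega) ⟨post, by rw [List.drop_left]; rfl⟩
  have hge : ¬ n.toNat < pre.length := by
    intro hlt
    obtain ⟨t, ht⟩ := hpref
    have h0 : (List.drop n.toNat (pre ++ '%' :: post))[0]? = some '%' := by
      rw [← ht]; rfl
    rw [List.getElem?_drop] at h0
    rw [List.getElem?_append_left (by omega)] at h0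
    exact h (List.mem_of_getElem? (by simpa using h0))
  omega

-- ===== VERDICT (by name: the statement is the Claim_ definition above) =====
theorem parse_spec : Claim_equal_parse := by
  intro raw_code _ hpre
  unfold Spec_parse
  unfold Pre_parse at hpre
  cases hcs : raw_code.toList with
  | nil => simp [parse, parse_alt, hcs, find_pct_none, tokenizeL_nil]
  | cons c rest =>
    have hop : c ∈ operators := by
      rw [hcs] at hpre; simpa using hpre
    by_cases hpc : c = '%'
    · -- first character is '%': everything after it is data
      subst hpc
      have h1 : parse raw_code = ([String.ofList ['%', ' ']], String.ofList rest) := by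
        simp only [parse, hcs]
        rw [List.foldl_cons, stepA_op _ _ _ hop, show (decide (('%' : Char) = '%')) = true by decide,
            foldA_data]
        simp
      have hf : PySem.Chars.find ('%' :: rest) ['%'] = (0 : Int) := by
        have := find_pct_at [] rest (by simp)
        simpa using this
      have h2 : parse_alt raw_code = ([String.ofList ['%', ' ']], String.ofList rest) := by
        simp only [parse_alt, hcs, hf]
        rw [if_neg (by norm_num), if_neg (by norm_num)]
        rw [show ((0 : Int).toNat + 1) = 1 by rfl,
            show List.take 1 ('%' :: rest) = ['%'] by simp,
            show List.drop 1 ('%' :: rest) = rest by simp]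
        rw [tokenizeL_cons]
        simp [nextOp, tokenizeL_nil]
      rw [h1, h2]
    · -- first character is another operator: A's loop runs from ([[c,' ']], '', 0, False)
      have hstep : raw_code.toList.foldl stepA ([], [], -1, false)
          = rest.foldl stepA (([] : List (List Char)) ++ [[c, ' ']], ([] : List Char),
              ((([] : List (List Char))).length : Int), false) := by
        rw [hcs, List.foldl_cons, stepA_op _ _ _ hop, show (decide (c = '%')) = false by simp [hpc]]
        norm_num
      have hA : parse raw_code
          = ((tokAcc [c, ' '] rest).map String.ofList, String.ofList (datAcc rest)) := by
        simp only [parse, hstep, foldA_code]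
        simp
      rw [hA]
      by_cases hmem : '%' ∈ rest
      · obtain ⟨pre, post, heq, hnp⟩ := first_pct_split hmem
        have hnp' : '%' ∉ c :: pre := by
          intro hx
          rcases List.mem_cons.mp hx with h1 | h1
          · exact hpc h1.symm
          · exact hnp h1
        have hf : PySem.Chars.find (c :: rest) ['%'] = ((c :: pre).length : Int) := by
          have := find_pct_at (c :: pre) post hnp'
          simpa [heq] using this
        have hsplit : (c :: rest : List Char) = (c :: pre) ++ '%' :: post := by simp [heq]
        have htake : (c :: rest).take ((c :: pre).length + 1) = (c :: pre) ++ ['%'] := by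
          rw [hsplit, List.take_append]; simp
        have hdrop : (c :: rest).drop ((c :: pre).length + 1) = post := by
          rw [hsplit, show (c :: pre).length + 1 = (c :: pre).length + 1 from rfl,
              List.drop_append]; simp
        have hkey : tokAcc [c, ' '] (pre ++ ['%']) = tokenizeL ((c :: pre) ++ ['%']) := by
          rw [show ((c :: pre) ++ ['%'] : List Char) = c :: (pre ++ ['%']) by simp,
              tokenizeL_cons, nextOp_cons]
          exact tokAcc_eq_tokenizeL (pre ++ ['%']) [c, ' ']
            (by rw [List.dropLast_concat]; exact hnp)
        simp only [parse_alt, hcs, hf]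
        rw [if_neg (by omega), if_neg (by omega),
            show (((c :: pre).length : Int)).toNat = (c :: pre).length by omega,
            htake, hdrop, heq, tokAcc_stop pre post [c, ' '] hnp, datAcc_app pre post hnp, hkey]
      · have hnc : '%' ∉ c :: rest := by
          intro hx
          rcases List.mem_cons.mp hx with h1 | h1
          · exact hpc h1.symm
          · exact hmem h1
        have hf : PySem.Chars.find (c :: rest) ['%'] = -1 := find_pct_none _ hnc
        have hkey : tokAcc [c, ' '] rest = tokenizeL (c :: rest) := by
          rw [tokenizeL_cons, nextOp_cons]
          exact tokAcc_eq_tokenizeL rest [c, ' '] (fun hx => hmem (List.dropLast_subset _ hx))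
        simp only [parse_alt, hcs, hf]
        rw [datAcc_none rest hmem, hkey]
        simp
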